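-- pv_equiv track=rewrite | github.com/g-walley/Advent-of-code | 2022/day20/solution.py | calc_out
-- ===== SOURCE A (Python) =====
-- from collections import deque
-- from typing import Deque, List
--
-- def calc_out(d: Deque) -> int:
--     # Remove all idxes from the queue, they are no longer necessary.
--     d = deque([num for (_, num) in d])
--     # Find the zero, and rotate it to the front.
--     d.rotate(-d.index(0))
--     # Rotate the deque by 1000 3 times, and sum the numbers at the front.
--     out = 0
--     for _ in range(3):
--         d.rotate(-1000)
--         out += d[0]
--     return out
-- ===== SOURCE B (Python) =====
-- def calc_out(d):
--     # Static modular index arithmetic on a plain list instead of a rotating deque.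
--     nums = [num for (_, num) in d]
--     n = len(nums)
--     z = nums.index(0)
--     return sum(nums[(z + 1000 * k) % n] for k in (1, 2, 3))
-- ===== Notes on version B (the rewrite author's own statement) =====
-- stated objective: idiomatic
-- what changed: Replaces the rotating-deque representation (index-to-front rotate plus three mutating rotate(-1000) steps reading the queue front) with a plain list and three static modular index lookups nums[(z+1000*k) % n].
import Mathlib
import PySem

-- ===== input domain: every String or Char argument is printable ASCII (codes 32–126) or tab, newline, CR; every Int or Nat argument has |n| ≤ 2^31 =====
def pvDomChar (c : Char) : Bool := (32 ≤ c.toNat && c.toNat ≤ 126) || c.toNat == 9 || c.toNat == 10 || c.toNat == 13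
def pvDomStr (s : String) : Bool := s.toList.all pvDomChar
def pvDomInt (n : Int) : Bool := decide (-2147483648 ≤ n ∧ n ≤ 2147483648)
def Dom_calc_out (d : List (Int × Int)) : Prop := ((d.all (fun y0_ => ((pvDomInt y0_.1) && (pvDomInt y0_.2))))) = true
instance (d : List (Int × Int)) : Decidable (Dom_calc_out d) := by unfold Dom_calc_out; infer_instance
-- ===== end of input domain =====

-- ===== PORT A =====
-- B replaces the rotating deque with static modular index lookups on a plain list (idiomatic rewrite).
def calc_out (d : List (Int × Int)) : Int :=
  let nums := d.map (fun p => p.2)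
  match PySem.List.index? nums 0 with
  | none => 0  -- Python raises ValueError here; excluded by Pre_calc_out
  | some z =>
    let dq := nums.rotate z          -- d.rotate(-z): left rotation, exactly List.rotate
    (((List.range 3).foldl (fun s _ =>
        let dq' := s.1.rotate 1000   -- d.rotate(-1000)
        (dq', s.2 + ((PySem.List.pyGet? dq' 0).getD 0))) (dq, (0 : Int)))).2

-- ===== PORT B =====
def calc_out_alt (d : List (Int × Int)) : Int :=
  let nums := d.map (fun p => p.2)
  let n := nums.length
  match PySem.List.index? nums 0 with
  | none => 0  -- nums.index(0) raises ValueError; excluded by Pre_calc_out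
  | some z =>
    ([1, 2, 3] : List Nat).foldl (fun acc k => acc + ((nums[(z + 1000 * k) % n]?).getD 0)) 0

-- ===== PRECONDITION & SPEC =====
-- Pre_ requires a zero among the values: otherwise nums.index(0) raises ValueError in both A and B.
def Pre_calc_out (d : List (Int × Int)) : Prop := (0 : Int) ∈ d.map (fun p => p.2)
instance (d : List (Int × Int)) : Decidable (Pre_calc_out d) := by unfold Pre_calc_out; infer_instance
def pvWitness_calc_out : (List (Int × Int)) := [(0, 3), (1, 0), (2, -2), (3, 5)]
def Spec_calc_out (d : List (Int × Int)) (out : Int) : Prop := out = calc_out_alt d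
instance (d : List (Int × Int)) (out : Int) : Decidable (Spec_calc_out d out) := by unfold Spec_calc_out; infer_instance

-- ===== CLAIM (what is proved, stated in full; the proofs are below) =====
def Claim_equal_calc_out : Prop := ∀ (d : List (Int × Int)), Dom_calc_out d → Pre_calc_out d → Spec_calc_out d (calc_out d)

-- ===== LEMMAS AND PROOFS =====

-- ===== VERDICT (by name: the statement is the Claim_ definition above) =====
theorem calc_out_spec : Claim_equal_calc_out := by
  intro d _ hpre
  unfold Spec_calc_out calc_out calc_out_alt
  simp only []
  set nums := d.map (fun p => p.2) with hn
  have hmem : (0 : Int) ∈ nums := hpre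
  rcases hz : PySem.List.index? nums 0 with _ | z
  · rw [PySem.List.index?_eq_none_iff] at hz
  · obtain ⟨hzlt, -, -⟩ := PySem.List.getElem_of_index?_eq_some hz
    have hpos : 0 < nums.length := Nat.lt_of_le_of_lt (Nat.zero_le _) hzlt
    simp only [show List.range 3 = [0, 1, 2] from rfl, List.foldl_cons, List.foldl_nil,
      List.rotate_rotate]
    have hget : ∀ m : Nat, (PySem.List.pyGet? (nums.rotate m) 0).getD 0 =
        (nums[m % nums.length]?).getD 0 := by
      intro m
      have hlen : 0 < (nums.rotate m).length := by simpa using hpos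
      rw [PySem.List.pyGet?_zero, List.getElem?_eq_getElem hlen, List.getElem_rotate,
        List.getElem?_eq_getElem (Nat.mod_lt _ hpos)]
      simp
    rw [hget, hget, hget]
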